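-- pv_equiv track=rewrite | github.com/tanishaf28/Codedex-March | oscar.py | oscar_pool
-- ===== SOURCE A (Python) =====
-- def oscar_pool(predictions):
--
--     winners = [
--         "One Battle After Another",
--         "Michael B. Jordan",
--         "Jessie Buckley",
--         "Paul Thomas Anderson"
--     ]
--
--     max_score = -1
--     compare_friend = ""
--     tie = False
--
--     for friend in predictions:
--         name = friend[0]
--         guesses = friend[1:]
--
--         score = 0
--         for i in range(len(winners)):
--             if guesses[i] == winners[i]:
--                 score += 1
--
--         if score > max_score:
--             max_score = score
--             compare_friend = name
--             tie = False
--         elif score == max_score: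
--             tie = True
--
--     if tie:
--         return "Tie"
--     return compare_friend
-- ===== SOURCE B (Python) =====
-- def _score(friend, winners):
--     guesses = friend[1:]
--     return sum(1 for i in range(len(winners)) if guesses[i] == winners[i])
--
--
-- def oscar_pool(predictions):
--
--     winners = [
--         "One Battle After Another",
--         "Michael B. Jordan",
--         "Jessie Buckley",
--         "Paul Thomas Anderson"
--     ]
--
--     if not predictions:
--         return ""
--
--     scores = [_score(friend, winners) for friend in predictions]
--
--     best = max(scores)
--     if scores.count(best) > 1:
--         return "Tie"
--     return predictions[scores.index(best)][0]
-- ===== Notes on version B (the rewrite author's own statement) =====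
-- stated objective: simpler
-- what changed: Replaces the single running-max/tie-flag/compare-friend state machine by a build-then-scan decomposition: compute a per-friend score table (zip against the winners), then max/count/index decide Tie vs first winner.
import Mathlib
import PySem

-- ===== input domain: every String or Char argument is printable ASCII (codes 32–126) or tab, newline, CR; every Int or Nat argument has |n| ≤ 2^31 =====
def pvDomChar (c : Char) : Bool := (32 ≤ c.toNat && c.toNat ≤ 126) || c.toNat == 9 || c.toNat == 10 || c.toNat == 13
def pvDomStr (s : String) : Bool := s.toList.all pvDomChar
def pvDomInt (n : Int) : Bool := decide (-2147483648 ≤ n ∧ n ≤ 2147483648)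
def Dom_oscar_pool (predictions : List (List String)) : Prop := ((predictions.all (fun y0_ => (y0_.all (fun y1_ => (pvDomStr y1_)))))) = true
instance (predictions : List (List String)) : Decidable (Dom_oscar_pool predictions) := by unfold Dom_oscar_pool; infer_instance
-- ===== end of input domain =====

-- B replaces A's running-max/tie-flag state machine by a simpler score-table + max/count/index scan (same O(n) cost).


-- ===== PORT A =====
def oscarWinners : List String :=
  ["One Battle After Another", "Michael B. Jordan", "Jessie Buckley", "Paul Thomas Anderson"]

-- score = 0; for i in range(len(winners)): if guesses[i] == winners[i]: score += 1
def oscarScoreA (guesses : List String) : Int :=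
  (PySem.List.pyRange 0 (oscarWinners.length : Int) 1).foldl
    (fun score i =>
      if PySem.List.pyGetD guesses i "" = PySem.List.pyGetD oscarWinners i "" then score + 1
      else score) 0

def oscarStep (st : Int × String × Bool) (friend : List String) : Int × String × Bool :=
  let name := PySem.List.pyGetD friend 0 ""
  let guesses := PySem.List.slice friend (some 1) none
  let score := oscarScoreA guesses
  if score > st.1 then (score, name, false)
  else if score = st.1 then (st.1, st.2.1, true)
  else st

def oscar_pool (predictions : List (List String)) : String :=
  let st := predictions.foldl oscarStep (-1, "", false)
  if st.2.2 then "Tie" else st.2.1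

-- ===== PORT B =====
def oscarWinnersB : List String :=
  ["One Battle After Another", "Michael B. Jordan", "Jessie Buckley", "Paul Thomas Anderson"]

-- _score: guesses = friend[1:]; sum(1 for i in range(len(winners)) if guesses[i] == winners[i])
def oscarScoreB (friend : List String) : Int :=
  let guesses := PySem.List.slice friend (some 1) none
  ((PySem.List.pyRange 0 (oscarWinnersB.length : Int) 1).map
    (fun i => if PySem.List.pyGetD guesses i "" = PySem.List.pyGetD oscarWinnersB i ""
              then (1 : Int) else 0)).sum

def oscar_pool_alt (predictions : List (List String)) : String :=
  if predictions = [] then ""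
  else
    let scores := predictions.map oscarScoreB
    let best := (PySem.List.max? scores (fun x => x)).getD 0
    if 1 < PySem.List.count scores best then "Tie"
    else
      let idx := (PySem.List.index? scores best).getD 0
      PySem.List.pyGetD (PySem.List.pyGetD predictions (idx : Int) []) 0 ""

-- ===== PRECONDITION & SPEC =====
-- Pre_ excludes exactly the inputs where A raises IndexError: a friend tuple shorter
-- than 5 entries (no name, or fewer than 4 guesses).
def Pre_oscar_pool (predictions : List (List String)) : Prop :=
  ∀ friend ∈ predictions, 5 ≤ friend.length
instance (predictions : List (List String)) : Decidable (Pre_oscar_pool predictions) := by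
  unfold Pre_oscar_pool; infer_instance

def pvWitness_oscar_pool : List (List String) :=
  [["Al", "One Battle After Another", "Michael B. Jordan", "Jessie Buckley", "X"],
   ["Bo", "A", "Michael B. Jordan", "B", "Paul Thomas Anderson"]]

def Spec_oscar_pool (predictions : List (List String)) (out : String) : Prop := out = oscar_pool_alt predictions
instance (predictions : List (List String)) (out : String) : Decidable (Spec_oscar_pool predictions out) := by unfold Spec_oscar_pool; infer_instance

-- ===== CLAIM (what is proved, stated in full; the proofs are below) =====
def Claim_equal_oscar_pool : Prop := ∀ (predictions : List (List String)), Dom_oscar_pool predictions → Pre_oscar_pool predictions → Spec_oscar_pool predictions (oscar_pool predictions)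

-- ===== LEMMAS AND PROOFS =====

-- A's loop body, rewritten with B's score function and plain head lookup (proof-layer only).
def oscarStep' (st : Int × String × Bool) (friend : List String) : Int × String × Bool :=
  let score := oscarScoreB friend
  if score > st.1 then (score, friend.getD 0 "", false)
  else if score = st.1 then (st.1, st.2.1, true)
  else st

-- first friend whose score equals M (proof-layer only)
def oscarFirst (l : List (List String)) (M : Int) : String :=
  match l with
  | [] => ""
  | fr :: l' => if oscarScoreB fr = M then fr.getD 0 "" else oscarFirst l' M

theorem oscarScoreB_nonneg (friend : List String) : 0 ≤ oscarScoreB friend := by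
  unfold oscarScoreB
  apply List.sum_nonneg
  intro x hx
  rcases List.mem_map.1 hx with ⟨i, _, rfl⟩
  split_ifs <;> norm_num

theorem oscarScore_eq (friend : List String) (h : 5 ≤ friend.length) :
    oscarScoreA (PySem.List.slice friend (some 1) none) = oscarScoreB friend := by
  have hrA : PySem.List.pyRange 0 ((oscarWinners.length : Nat) : Int) 1 = [0, 1, 2, 3] := by decide
  have hrB : PySem.List.pyRange 0 ((oscarWinnersB.length : Nat) : Int) 1 = [0, 1, 2, 3] := by decide
  match friend, h with
  | a :: b :: c :: d :: e :: rest, _ =>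
    simp only [oscarScoreA, oscarScoreB, hrA, hrB, PySem.List.slice_from_one, List.tail_cons,
      List.foldl, List.map, List.sum_cons, List.sum_nil]
    have g0 : PySem.List.pyGetD (b :: c :: d :: e :: rest) (0 : Int) "" = b := by simp [pysem]
    have g1 : PySem.List.pyGetD (b :: c :: d :: e :: rest) (1 : Int) "" = c := by simp [pysem]
    have g2 : PySem.List.pyGetD (b :: c :: d :: e :: rest) (2 : Int) "" = d := by simp [pysem]
    have g3 : PySem.List.pyGetD (b :: c :: d :: e :: rest) (3 : Int) "" = e := by simp [pysem]
    rw [g0, g1, g2, g3]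
    simp only [oscarWinners, oscarWinnersB, PySem.List.pyGetD, PySem.List.pyGet?,
      PySem.List.pyIdx?]
    norm_num [show Int.toNat 3 = 3 from rfl, show Int.toNat 2 = 2 from rfl]
    split_ifs <;> norm_num

theorem oscarStep_eq_step' (friend : List String) (h : 5 ≤ friend.length)
    (st : Int × String × Bool) : oscarStep st friend = oscarStep' st friend := by
  simp only [oscarStep, oscarStep', oscarScore_eq friend h, PySem.List.pyGetD_zero]

-- characterization of A's loop: running max, first maximizer, tie flag = max attained twice
theorem oscarLoop_char (l : List (List String)) (m : Int) (n : String) (t : Bool) :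
    (let st := l.foldl oscarStep' (m, n, t); if st.2.2 then "Tie" else st.2.1) =
      (if m < (l.map oscarScoreB).foldl max m then
        (if 1 < (l.map oscarScoreB).count ((l.map oscarScoreB).foldl max m) then "Tie"
         else oscarFirst l ((l.map oscarScoreB).foldl max m))
       else if t = true ∨ 0 < (l.map oscarScoreB).count m then "Tie" else n) := by
  induction l generalizing m n t with
  | nil => simp
  | cons fr l' ih =>
    simp only [List.foldl_cons, List.map_cons, List.count_cons, beq_iff_eq]
    rcases lt_trichotomy (oscarScoreB fr) m with h1 | h1 | h1
    · -- score < m : state unchanged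
      have hstep : oscarStep' (m, n, t) fr = (m, n, t) := by
        simp [oscarStep', h1.not_gt, h1.ne]
      have hmax : max m (oscarScoreB fr) = m := by omega
      rw [hstep, ih, hmax]
      have hM' := PySem.List.le_foldl_max (l'.map oscarScoreB) m
      set M := (l'.map oscarScoreB).foldl max m with hMdef
      by_cases h2 : m < M
      · rw [if_pos h2, if_pos h2, if_neg (show ¬ oscarScoreB fr = M by omega),
          oscarFirst, if_neg (show ¬ oscarScoreB fr = M by omega)]
        simp
      · rw [if_neg h2, if_neg h2, if_neg (show ¬ oscarScoreB fr = m by omega)]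
        simp
    · -- score = m : tie := true
      have hstep : oscarStep' (m, n, t) fr = (m, n, true) := by
        simp [oscarStep', h1]
      have hmax : max m (oscarScoreB fr) = m := by omega
      rw [hstep, ih, hmax]
      have hM' := PySem.List.le_foldl_max (l'.map oscarScoreB) m
      set M := (l'.map oscarScoreB).foldl max m with hMdef
      by_cases h2 : m < M
      · rw [if_pos h2, if_pos h2, if_neg (show ¬ oscarScoreB fr = M by omega),
          oscarFirst, if_neg (show ¬ oscarScoreB fr = M by omega)]
        simp
      · rw [if_neg h2, if_neg h2, if_pos (Or.inl rfl),
          if_pos (Or.inr (by rw [if_pos h1]; omega))]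
    · -- score > m : new leader
      have hstep : oscarStep' (m, n, t) fr = (oscarScoreB fr, fr.getD 0 "", false) := by
        simp [oscarStep', h1]
      have hmax : max m (oscarScoreB fr) = oscarScoreB fr := by omega
      rw [hstep, ih, hmax]
      have hM' := PySem.List.le_foldl_max (l'.map oscarScoreB) (oscarScoreB fr)
      set M := (l'.map oscarScoreB).foldl max (oscarScoreB fr) with hMdef
      have hmM : m < M := by omega
      rw [if_pos hmM]
      by_cases h2 : oscarScoreB fr < M
      · rw [if_pos h2, if_neg (show ¬ oscarScoreB fr = M by omega),
          oscarFirst, if_neg (show ¬ oscarScoreB fr = M by omega)]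
        simp
      · have hMe : M = oscarScoreB fr := by omega
        rw [if_neg h2, if_pos hMe.symm, oscarFirst, if_pos hMe.symm, ← hMe]
        by_cases hc : 0 < (l'.map oscarScoreB).count M
        · rw [if_pos (Or.inr hc), if_pos (by omega)]
        · rw [if_neg (by simp only [Bool.false_eq_true, false_or]; exact hc), if_neg (by omega)]

-- B's index lookup computes the first maximizer
theorem oscarFirst_eq_index (l : List (List String)) (M : Int) (h : M ∈ l.map oscarScoreB) :
    oscarFirst l M =
      PySem.List.pyGetD
        (PySem.List.pyGetD l (((PySem.List.index? (l.map oscarScoreB) M).getD 0 : Nat) : Int) [])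
        0 "" := by
  induction l with
  | nil => simp at h
  | cons fr l' ih =>
    by_cases h1 : oscarScoreB fr = M
    · rw [List.map_cons, h1]
      rw [PySem.List.index?_cons_self]
      simp [oscarFirst, h1, PySem.List.pyGetD_zero]
    · have hm : M ∈ l'.map oscarScoreB := by
        rw [List.map_cons, List.mem_cons] at h
        rcases h with h' | h'
        · exact absurd h'.symm h1
        · exact h'
      rw [List.map_cons, PySem.List.index?_cons_of_ne (l'.map oscarScoreB) h1]
      obtain ⟨k, hk⟩ := Option.isSome_iff_exists.1 ((PySem.List.index?_isSome_iff _ _).2 hm)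
      rw [hk]
      simp only [Option.map_some, Option.getD_some]
      rw [oscarFirst, if_neg h1, ih hm, hk]
      rw [PySem.List.pyGetD_natCast, PySem.List.pyGetD_natCast]
      simp [List.getD]

theorem oscar_pool_spec : Claim_equal_oscar_pool := by
  intro predictions _hdom hpre
  unfold Spec_oscar_pool
  match predictions with
  | [] => rfl
  | fr :: l' =>
    have hpre' : ∀ friend ∈ fr :: l', 5 ≤ friend.length := hpre
    have hA : oscar_pool (fr :: l') =
        (let st := (fr :: l').foldl oscarStep' (-1, "", false);
         if st.2.2 then "Tie" else st.2.1) := by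
      unfold oscar_pool
      rw [PySem.List.foldl_congr_mem (l := fr :: l')
        (f := oscarStep) (g := oscarStep') (init := ((-1 : Int), "", false))
        (fun acc x hx => oscarStep_eq_step' x (hpre' x hx) acc)]
    rw [hA, oscarLoop_char]
    -- the RHS head: scores, running max from -1
    have h0 : (0 : Int) ≤ oscarScoreB fr := oscarScoreB_nonneg fr
    have hmax1 : max (-1 : Int) (oscarScoreB fr) = oscarScoreB fr := by omega
    have hM := PySem.List.le_foldl_max (l'.map oscarScoreB) (oscarScoreB fr)
    simp only [List.map_cons, List.foldl_cons, hmax1]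
    set M := (l'.map oscarScoreB).foldl max (oscarScoreB fr) with hMdef
    have hmM : (-1 : Int) < M := by omega
    rw [if_pos hmM]
    -- now unfold B
    have hMmem : M ∈ (fr :: l').map oscarScoreB := by
      rw [List.map_cons, List.mem_cons]
      rcases PySem.List.foldl_max_mem (l'.map oscarScoreB) (oscarScoreB fr) with h | h
      · exact Or.inl (hMdef.trans h)
      · exact Or.inr (by rw [hMdef]; exact h)
    unfold oscar_pool_alt
    rw [if_neg (show ¬ (fr :: l' = []) from by simp)]
    simp only [List.map_cons, PySem.List.max?_id_cons, Option.getD_some, ← hMdef,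
      PySem.List.count_eq]
    by_cases hc : 1 < List.count M (oscarScoreB fr :: List.map oscarScoreB l')
    · rw [if_pos hc, if_pos hc]
    · rw [if_neg hc, if_neg hc]
      have := oscarFirst_eq_index (fr :: l') M hMmem
      simp only [List.map_cons] at this
      exact this
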